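-- pv_equiv track=rewrite | github.com/mengjieAlphaJay/DBRP-for-Paper-Source-Tracing | PTSdata.py | pair_elements
-- ===== SOURCE A (Python) =====
-- def pair_elements(trace_list, ref_list):
--     paired_list = []  # 初始化结果列表
--     trace_index, ref_index = 0, 0  #
--
--     while trace_index < len(trace_list) and ref_index < len(ref_list):
--         paired_list.append([trace_list[trace_index], ref_list[ref_index]])
--         trace_index += 1
--         ref_index += 1
--
--     remaining = trace_list[trace_index:] + ref_list[ref_index:]
--     while len(remaining) > 0:
--         if len(remaining) >= 2:
--             paired_list.append(remaining[:2])
--             remaining = remaining[2:]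
--         else:
--             paired_list.append(remaining)
--             break
--
--     while len(paired_list) > 3:
--         last = paired_list.pop()
--         paired_list[-1].extend(last)
--
--     return paired_list
-- ===== SOURCE B (Python) =====
-- def pair_elements(trace_list, ref_list):
--     k = min(len(trace_list), len(ref_list))
--     groups = [[a, b] for a, b in zip(trace_list, ref_list)]
--     rem = trace_list[k:] + ref_list[k:]
--     groups += [rem[i:i + 2] for i in range(0, len(rem), 2)]
--     if len(groups) > 3:
--         groups = groups[:2] + [[x for g in groups[2:] for x in g]]
--     return groups
-- ===== Notes on version B (the rewrite author's own statement) =====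
-- stated objective: faster
-- what changed: B builds the group list declaratively (zip for the paired prefix, one range-step-2 chunk comprehension over the remainder) and replaces A's destructive pop/extend collapse loop with the closed expression groups[:2] + [flatten(groups[2:])].
import Mathlib
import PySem

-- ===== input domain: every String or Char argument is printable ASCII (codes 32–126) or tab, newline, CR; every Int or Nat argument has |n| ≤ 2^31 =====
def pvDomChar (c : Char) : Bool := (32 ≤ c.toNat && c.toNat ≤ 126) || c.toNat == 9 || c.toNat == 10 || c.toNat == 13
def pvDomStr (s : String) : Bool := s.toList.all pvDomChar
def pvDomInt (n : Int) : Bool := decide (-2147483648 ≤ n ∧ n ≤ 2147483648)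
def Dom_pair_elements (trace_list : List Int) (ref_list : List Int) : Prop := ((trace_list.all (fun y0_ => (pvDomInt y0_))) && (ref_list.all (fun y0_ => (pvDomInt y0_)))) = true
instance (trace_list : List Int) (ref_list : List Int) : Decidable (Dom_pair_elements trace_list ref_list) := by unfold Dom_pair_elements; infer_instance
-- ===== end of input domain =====

-- B replaces A's index loops and destructive pop/extend collapse loop by a zip + step-2-range
-- chunking and the closed expression groups[:2] + [flatten(groups[2:])]; objective: simpler.

-- ===== PORT A =====
-- first while loop: walks both lists in step collecting pairs; also yields the unconsumed
-- suffixes (= trace_list[trace_index:] and ref_list[ref_index:] at loop exit)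
def pvPairLoopA : List Int → List Int → List (List Int) × List Int × List Int
  | a :: as, b :: bs =>
      let r := pvPairLoopA as bs
      ([a, b] :: r.1, r.2)
  | as, bs => ([], as, bs)

-- second while loop: append remaining[:2], remaining = remaining[2:]; single leftover kept
def pvChunkLoopA : List Int → List (List Int)
  | [] => []
  | [x] => [[x]]
  | x :: y :: rest => [x, y] :: pvChunkLoopA rest

-- third while loop: pop the last group and extend the new last group with it while len > 3
def pvCollapseLoopA (l : List (List Int)) : List (List Int) :=
  if l.length > 3 then
    pvCollapseLoopA (l.dropLast.dropLast ++ [l.dropLast.getLast! ++ l.getLast!])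
  else l
termination_by l.length
decreasing_by simp [List.length_dropLast]; omega

def pair_elements (trace_list : List Int) (ref_list : List Int) : List (List Int) :=
  let r := pvPairLoopA trace_list ref_list
  let remaining := r.2.1 ++ r.2.2
  pvCollapseLoopA (r.1 ++ pvChunkLoopA remaining)

-- ===== PORT B =====
def pair_elements_alt (trace_list : List Int) (ref_list : List Int) : List (List Int) :=
  let k := min trace_list.length ref_list.length
  let rem := trace_list.drop k ++ ref_list.drop k
  let groups :=
    (trace_list.zip ref_list).map (fun p => [p.1, p.2]) ++
      (PySem.List.pyRange 0 (rem.length) 2).map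
        (fun i => PySem.List.slice rem (some i) (some (i + 2)))
  if groups.length > 3 then groups.take 2 ++ [(groups.drop 2).flatten] else groups

-- ===== PRECONDITION & SPEC =====
def Spec_pair_elements (trace_list : List Int) (ref_list : List Int) (out : List (List Int)) : Prop := out = pair_elements_alt trace_list ref_list
instance (trace_list : List Int) (ref_list : List Int) (out : List (List Int)) : Decidable (Spec_pair_elements trace_list ref_list out) := by unfold Spec_pair_elements; infer_instance

-- ===== CLAIM (what is proved, stated in full; the proofs are below) =====
def Claim_equal_pair_elements : Prop := ∀ (trace_list : List Int) (ref_list : List Int), Dom_pair_elements trace_list ref_list → Spec_pair_elements trace_list ref_list (pair_elements trace_list ref_list)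

-- ===== LEMMAS AND PROOFS =====

-- phase 1: the pairing loop is zip-map, and the leftovers are the dropped suffixes
theorem pvPairLoopA_eq (tl rl : List Int) :
    pvPairLoopA tl rl =
      ((tl.zip rl).map (fun p => [p.1, p.2]),
        tl.drop (min tl.length rl.length), rl.drop (min tl.length rl.length)) := by
  induction tl generalizing rl with
  | nil => cases rl <;> simp [pvPairLoopA]
  | cons a as ih =>
      cases rl with
      | nil => simp [pvPairLoopA]
      | cons b bs => simp [pvPairLoopA, ih bs, Nat.succ_min_succ]

-- phase 2, natural-index form of B's chunk comprehension
theorem pvChunk_nat (rem : List Int) :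
    (List.range ((rem.length + 1) / 2)).map
        (fun (k : Nat) => PySem.List.slice rem (some ((2*k : Nat) : Int)) (some ((2*k+2 : Nat) : Int))) =
      pvChunkLoopA rem := by
  induction rem using pvChunkLoopA.induct with
  | case1 => simp [pvChunkLoopA]
  | case2 x => simp [pvChunkLoopA, PySem.List.slice, PySem.List.clampIdx]
  | case3 x y rest ih =>
      have hlen : ((x :: y :: rest).length + 1) / 2 = (rest.length + 1) / 2 + 1 := by
        simp; omega
      rw [hlen, List.range_succ_eq_map, List.map_cons, List.map_map]
      congr 1
      rw [← ih]
      apply List.map_congr_left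
      intro k _
      simp only [Function.comp_apply, PySem.List.slice_natCast]
      have h2 : 2 * (k+1) = (2*k) + 2 := by ring
      rw [h2]
      simp [List.drop_succ_cons]

-- phase 2: B's step-2 range comprehension equals A's chunking loop
theorem pvChunk_eq (rem : List Int) :
    (PySem.List.pyRange 0 (rem.length) 2).map
        (fun i => PySem.List.slice rem (some i) (some (i + 2))) =
      pvChunkLoopA rem := by
  rw [PySem.List.pyRange_of_pos 0 (rem.length) (by norm_num), List.map_map]
  have hcnt : (if (0:Int) < rem.length then (((rem.length:Int) - 0 + 2 - 1) / 2).toNat else 0)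
      = (rem.length + 1) / 2 := by
    split_ifs with h <;> omega
  rw [hcnt, ← pvChunk_nat rem]
  apply List.map_congr_left
  intro k _
  simp only [Function.comp_apply]
  congr 2 <;> push_cast <;> ring

theorem pvGetLast!_concat (w : List (List Int)) (y : List Int) : (w ++ [y]).getLast! = y := by
  cases w with
  | nil => rfl
  | cons a w => simp [List.getLast!]

-- one iteration of the collapse loop merges the last two groups
theorem pvStep_eq (w : List (List Int)) (y z : List Int) :
    (w ++ [y, z]).dropLast.dropLast ++ [(w ++ [y, z]).dropLast.getLast! ++ (w ++ [y, z]).getLast!]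
      = w ++ [y ++ z] := by
  have h : w ++ [y, z] = (w ++ [y]) ++ [z] := by simp
  rw [h, List.dropLast_concat, List.dropLast_concat, pvGetLast!_concat, pvGetLast!_concat]

-- phase 3: A's collapse loop is B's closed slice-and-flatten expression
theorem pvCollapse_eq (l : List (List Int)) :
    pvCollapseLoopA l =
      if l.length > 3 then l.take 2 ++ [(l.drop 2).flatten] else l := by
  induction l using pvCollapseLoopA.induct with
  | case1 l hlen ih =>
      rw [pvCollapseLoopA, if_pos hlen]
      rcases hr : l.reverse with _ | ⟨z, tl⟩
      · rw [List.reverse_eq_nil_iff] at hr; subst hr; simp at hlen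
      · rcases tl with _ | ⟨y, wr⟩
        · have hl : l = [z] := by
            have := congrArg List.reverse hr; simpa using this
          subst hl; simp at hlen
        · have hl : l = wr.reverse ++ [y, z] := by
            have := congrArg List.reverse hr; simpa using this
          subst hl
          have hwlen : 2 ≤ wr.reverse.length := by
            simp at hlen ⊢; omega
          rw [pvStep_eq] at ih ⊢
          rw [ih]
          by_cases h2 : 2 < wr.reverse.length
          · rw [if_pos (by simp at h2 ⊢; omega), if_pos (by simp at hlen ⊢; omega)]
            rw [List.take_append_of_le_length (by omega), List.take_append_of_le_length (by omega),
                List.drop_append_of_le_length (by omega), List.drop_append_of_le_length (by omega)]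
            simp
          · have hw2 : wr.reverse.length = 2 := by omega
            rcases List.length_eq_two.mp hw2 with ⟨a, b, hab⟩
            rw [hab]
            simp
  | case2 l hlen =>
      rw [pvCollapseLoopA, if_neg hlen, if_neg hlen]

-- ===== VERDICT (by name: the statement is the Claim_ definition above) =====
theorem pair_elements_spec : Claim_equal_pair_elements := by
  intro tl rl _
  show pair_elements tl rl = pair_elements_alt tl rl
  simp only [pair_elements, pair_elements_alt, pvPairLoopA_eq, pvCollapse_eq, pvChunk_eq]
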